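-- pv_equiv track=rewrite | github.com/cdangeard/rainbowNifi | src/updateAtribute.py | simplify_keys
-- ===== SOURCE A (Python) =====
-- def simplify_keys(dic: dict) -> dict:
--     """
--     Simplify the keys of a dictionary by removing the prefix up to the last dot.
--     For example, 'a.b.c' becomes 'c'.
--     if c exist and a.b.c exist, c will remain and a.b.c will become c
--     :param dic: Dictionary with keys to be simplified
--     :return: New dictionary with simplified keys ex: {'key': 'c', 'value': '$.a.b.c'}
--     """
--     sorted_by_length = sorted(dic.keys(), key=lambda x: len(x.split('.')), reverse=False)
--     simplified_keys = {}
--     for key in sorted_by_length: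
--         parts = key.split('.')
--         simplified_key = parts[-1]
--         if simplified_key not in simplified_keys.keys():
--             simplified_keys[simplified_key] = key
--         else:
--             # If the simplified key already exists, keep the original key
--             simplified_keys[key] = key
--     # Convert to list of dictionaries
--     elements = [{'key': k, 'value': f'$.{v}'} for k, v in simplified_keys.items()]
--     return elements
-- ===== SOURCE B (Python) =====
-- def simplify_keys(dic: dict) -> dict:
--     # Per last segment, elect the winning key (fewest dots, earliest on ties);
--     # winners take the short name, every other key keeps its full name; the
--     # rows are then stably sorted by dot count. No sequential "already taken"
--     # state: each row's name is decided independently from the winner table.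
--     winner = {}
--     for k in dic:
--         s = k.split('.')[-1]
--         if s not in winner or k.count('.') < winner[s].count('.'):
--             winner[s] = k
--     rows = [(k.count('.'),
--              {'key': k.split('.')[-1] if winner[k.split('.')[-1]] == k else k,
--               'value': f'$.{k}'})
--             for k in dic]
--     rows.sort(key=lambda t: t[0])
--     return [r for _, r in rows]
-- ===== Notes on version B (the rewrite author's own statement) =====
-- stated objective: alternative
-- what changed: Replaces A's sequential pass over depth-sorted keys with a mutating 'already taken' dict by an order-independent election: one pass builds a winner table mapping each last segment to its argmin key (fewest dots, earliest on ties), each row's name is then decided independently by comparing against the winner, and the rows are stably sorted by dot count at the end.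
import Mathlib
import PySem

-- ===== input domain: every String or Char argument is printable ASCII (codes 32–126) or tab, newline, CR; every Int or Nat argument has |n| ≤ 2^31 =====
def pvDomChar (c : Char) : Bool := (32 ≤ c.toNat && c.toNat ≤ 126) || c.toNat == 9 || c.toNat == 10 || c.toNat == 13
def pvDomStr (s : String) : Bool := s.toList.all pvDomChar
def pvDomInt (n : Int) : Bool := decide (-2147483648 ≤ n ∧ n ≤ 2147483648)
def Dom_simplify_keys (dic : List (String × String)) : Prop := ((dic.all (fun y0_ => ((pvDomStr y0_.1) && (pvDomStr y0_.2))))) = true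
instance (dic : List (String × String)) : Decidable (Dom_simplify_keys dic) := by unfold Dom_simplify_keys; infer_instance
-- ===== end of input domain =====

-- B replaces A's sequential pass over depth-sorted keys with its mutating "already taken" dict
-- by an order-independent election: a winner table maps each last segment to its argmin key,
-- every row's name is decided independently against that table, and the rows are stably sorted
-- by dot count at the end (objective: alternative algorithm, same observable result).

-- ===== PORT A =====
def simplify_keys (dic : List (String × String)) : List (List (String × String)) :=
  let sorted_by_length := PySem.List.sorted (PySem.Dict.ofList dic).keys
      (fun x => ((((PySem.Str.split? x ".").getD []).length : Int))) false
  let simplified_keys := sorted_by_length.foldl (fun sk key =>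
      -- parts = key.split('.'); the separator "." is nonempty, so split? is always `some`
      let parts := (PySem.Str.split? key ".").getD []
      -- parts[-1]; split never returns an empty list, so pyGet? is always `some`
      let simplified_key := (PySem.List.pyGet? parts (-1)).getD ""
      if !sk.contains simplified_key then sk.insert simplified_key key
      else sk.insert key key) PySem.Dict.empty
  -- [{'key': k, 'value': f'$.{v}'} for k, v in simplified_keys.items()]
  simplified_keys.items.map (fun kv => [("key", kv.1), ("value", String.ofList ('$' :: '.' :: kv.2.toList))])

-- ===== PORT B =====
def simplify_keys_alt (dic : List (String × String)) : List (List (String × String)) :=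
  -- winner = {}; for k in dic: s = k.split('.')[-1];
  --   if s not in winner or k.count('.') < winner[s].count('.'): winner[s] = k
  let winner := (PySem.Dict.ofList dic).keys.foldl
    (fun (w : PySem.Dict String String) k =>
      -- k.split('.')[-1]: "." is nonempty and split never returns [], so both getD defaults are dead
      let s := (PySem.List.pyGet? ((PySem.Str.split? k ".").getD []) (-1)).getD ""
      if !w.contains s || decide (PySem.Str.count k "." < PySem.Str.count (w.getD s "") ".") then
        w.insert s k
      else w) PySem.Dict.empty
  -- rows = [(k.count('.'), {'key': s if winner[s] == k else k, 'value': f'$.{k}'}) for k in dic]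
  let rows := (PySem.Dict.ofList dic).keys.map (fun k =>
    let s := (PySem.List.pyGet? ((PySem.Str.split? k ".").getD []) (-1)).getD ""
    -- winner[s]: s is always a key of winner (k itself was a candidate for s), so getD's default is dead
    (PySem.Str.count k ".",
      [("key", if winner.getD s "" == k then s else k),
       ("value", String.ofList ('$' :: '.' :: k.toList))]))
  -- rows.sort(key=lambda t: t[0]); return [r for _, r in rows]
  (PySem.List.sorted rows (fun t => t.1) false).map (fun t => t.2)

-- ===== PRECONDITION & SPEC =====
def Spec_simplify_keys (dic : List (String × String)) (out : List (List (String × String))) : Prop := out = simplify_keys_alt dic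
instance (dic : List (String × String)) (out : List (List (String × String))) : Decidable (Spec_simplify_keys dic out) := by unfold Spec_simplify_keys; infer_instance

-- ===== CLAIM (what is proved, stated in full; the proofs are below) =====
def Claim_equal_simplify_keys : Prop := ∀ (dic : List (String × String)), Dom_simplify_keys dic → Spec_simplify_keys dic (simplify_keys dic)

-- ===== LEMMAS AND PROOFS =====

-- A structural model of Python's s.split('.') (PySem.Chars.splitOn with a one-char separator).
def splitDot : List Char → List (List Char)
  | [] => [[]]
  | c :: r =>
    if c = '.' then [] :: splitDot r
    else
      match splitDot r with
      | [] => [[c]]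
      | p :: ps => (c :: p) :: ps

theorem splitDot_ne_nil (cs : List Char) : splitDot cs ≠ [] := by
  cases cs with
  | nil => simp [splitDot]
  | cons c r =>
    simp only [splitDot]
    split
    · simp
    · split <;> simp

theorem splitOn_go_eq (fuel : Nat) (l cur : List Char) (acc : List (List Char))
    (h : l.length + 1 ≤ fuel) :
    PySem.Chars.splitOn.go ['.'] fuel l cur acc =
      acc.reverse ++
        (match splitDot l with
         | [] => []
         | p :: ps => (cur.reverse ++ p) :: ps) := by
  induction fuel generalizing l cur acc with
  | zero => omega
  | succ f ih =>
    cases l with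
    | nil => simp [PySem.Chars.splitOn.go, splitDot]
    | cons c r =>
      by_cases hc : c = '.'
      · subst hc
        rw [show PySem.Chars.splitOn.go ['.'] (f+1) ('.' :: r) cur acc
              = PySem.Chars.splitOn.go ['.'] f r [] (cur.reverse :: acc) from by
            simp [PySem.Chars.splitOn.go, List.isPrefixOf]]
        rw [ih r [] (cur.reverse :: acc) (by simp at h ⊢; omega)]
        have := splitDot_ne_nil r
        cases hr : splitDot r with
        | nil => exact absurd hr this
        | cons p ps => simp [splitDot, hr]
      · rw [show PySem.Chars.splitOn.go ['.'] (f+1) (c :: r) cur acc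
              = PySem.Chars.splitOn.go ['.'] f r (c :: cur) acc from by
            have hc' : ¬(('.':Char) = c) := fun e => hc e.symm
            simp [PySem.Chars.splitOn.go, List.isPrefixOf, hc']]
        rw [ih r (c :: cur) acc (by simp at h ⊢; omega)]
        have := splitDot_ne_nil r
        cases hr : splitDot r with
        | nil => exact absurd hr this
        | cons p ps => simp [splitDot, hr, hc]

theorem splitOn_eq_splitDot (cs : List Char) :
    PySem.Chars.splitOn cs ['.'] = splitDot cs := by
  show PySem.Chars.splitOn.go ['.'] (cs.length + 1) cs [] [] = _
  rw [splitOn_go_eq _ _ _ _ (le_refl _)]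
  have := splitDot_ne_nil cs
  cases hr : splitDot cs with
  | nil => exact absurd hr this
  | cons p ps => simp

theorem splitDot_of_not_mem {cs : List Char} (h : '.' ∉ cs) : splitDot cs = [cs] := by
  induction cs with
  | nil => rfl
  | cons c r ih =>
    simp only [List.mem_cons, not_or] at h
    have hc : ¬ c = '.' := fun e => h.1 e.symm
    simp [splitDot, hc, ih h.2]

theorem splitDot_cons_dot (r : List Char) : splitDot ('.' :: r) = [] :: splitDot r := by
  simp [splitDot]

theorem splitDot_cons_ne {c : Char} (r : List Char) (hc : ¬ c = '.') (p : List Char)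
    (ps : List (List Char)) (hr : splitDot r = p :: ps) :
    splitDot (c :: r) = (c :: p) :: ps := by
  simp [splitDot, hc, hr]

theorem splitDot_length_ge_two {cs : List Char} (h : '.' ∈ cs) :
    2 ≤ (splitDot cs).length := by
  induction cs with
  | nil => simp at h
  | cons c r ih =>
    by_cases hc : c = '.'
    · subst hc
      rw [splitDot_cons_dot]
      have h1 : 1 ≤ (splitDot r).length := List.length_pos_of_ne_nil (splitDot_ne_nil r)
      simp; omega
    · have hr : '.' ∈ r := by
        rcases List.mem_cons.mp h with h1 | h1
        · exact absurd h1.symm hc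
        · exact h1
      have h2 := ih hr
      cases hsp : splitDot r with
      | nil => exact absurd hsp (splitDot_ne_nil r)
      | cons p ps =>
        rw [splitDot_cons_ne r hc p ps hsp]
        rw [hsp] at h2; simp at h2 ⊢; omega

theorem splitDot_getLast? (cs : List Char) :
    ∃ p, (splitDot cs).getLast? = some p ∧ '.' ∉ p := by
  induction cs with
  | nil => exact ⟨[], by simp [splitDot], by simp⟩
  | cons c r ih =>
    obtain ⟨p, hp, hnp⟩ := ih
    cases hsp : splitDot r with
    | nil => exact absurd hsp (splitDot_ne_nil r)
    | cons q qs =>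
      rw [hsp] at hp
      by_cases hc : c = '.'
      · subst hc
        rw [splitDot_cons_dot, hsp]
        exact ⟨p, by simpa using hp, hnp⟩
      · rw [splitDot_cons_ne r hc q qs hsp]
        cases hqs : qs with
        | nil =>
          subst hqs
          have hpq : q = p := by simpa using hp
          subst hpq
          exact ⟨c :: q, by simp, by
            simp only [List.mem_cons, not_or]
            exact ⟨fun e => hc e.symm, hnp⟩⟩
        | cons w ws =>
          subst hqs
          exact ⟨p, by simpa using hp, hnp⟩

theorem splitDot_length_eq_count (cs : List Char) :
    (splitDot cs).length = cs.count '.' + 1 := by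
  induction cs with
  | nil => simp [splitDot]
  | cons c r ih =>
    by_cases hc : c = '.'
    · subst hc
      rw [splitDot_cons_dot]
      simp [ih]
    · cases hsp : splitDot r with
      | nil => exact absurd hsp (splitDot_ne_nil r)
      | cons p ps =>
        rw [splitDot_cons_ne r hc p ps hsp]
        rw [hsp] at ih
        simp at ih
        simp [hc, ih]

-- proof-level names for the two quantities both programs compute per key
def kf (x : String) : Int := (((PySem.Str.split? x ".").getD []).length : Int)
def cnt (x : String) : Nat := PySem.Str.count x "."
def lastseg (x : String) : String :=
  (PySem.List.pyGet? ((PySem.Str.split? x ".").getD []) (-1)).getD ""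

theorem parts_eq (x : String) :
    (PySem.Str.split? x ".").getD [] = (splitDot x.toList).map String.ofList := by
  show ((PySem.Chars.split? x.toList ['.']).map (List.map String.ofList)).getD [] = _
  rw [show PySem.Chars.split? x.toList ['.'] = some (PySem.Chars.splitOn x.toList ['.']) from by
    simp [PySem.Chars.split?]]
  rw [splitOn_eq_splitDot]
  rfl

theorem kf_eq (x : String) : kf x = ((splitDot x.toList).length : Int) := by
  simp [kf, parts_eq]

theorem count_go_eq (fuel : Nat) (l : List Char) (acc : Nat) (h : l.length ≤ fuel) :
    PySem.Chars.count.go ['.'] fuel l acc = acc + l.count '.' := by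
  induction fuel generalizing l acc with
  | zero =>
    cases l with
    | nil => simp [PySem.Chars.count.go]
    | cons c r => simp at h
  | succ f ih =>
    cases l with
    | nil => simp [PySem.Chars.count.go]
    | cons c r =>
      by_cases hc : c = '.'
      · subst hc
        rw [show PySem.Chars.count.go ['.'] (f+1) ('.' :: r) acc
              = PySem.Chars.count.go ['.'] f r (acc + 1) from by
            simp [PySem.Chars.count.go, List.isPrefixOf]]
        rw [ih r (acc + 1) (by simp at h ⊢; omega)]
        simp; omega
      · rw [show PySem.Chars.count.go ['.'] (f+1) (c :: r) acc
              = PySem.Chars.count.go ['.'] f r acc from by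
            have hc' : ¬(('.':Char) = c) := fun e => hc e.symm
            simp [PySem.Chars.count.go, List.isPrefixOf, hc']]
        rw [ih r acc (by simp at h ⊢; omega)]
        simp [hc]

theorem cnt_eq (x : String) : cnt x = x.toList.count '.' := by
  show PySem.Str.count x "." = _
  rw [PySem.Str.count_eq]
  show PySem.Chars.count x.toList ['.'] = _
  rw [show PySem.Chars.count x.toList ['.']
        = PySem.Chars.count.go ['.'] x.toList.length x.toList 0 from by
    simp [PySem.Chars.count]]
  rw [count_go_eq _ _ _ (le_refl _)]
  simp

theorem kf_eq_cnt (x : String) : kf x = (cnt x : Int) + 1 := by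
  rw [kf_eq, cnt_eq, splitDot_length_eq_count]
  push_cast
  ring

theorem one_le_kf (x : String) : 1 ≤ kf x := by
  rw [kf_eq]
  have := List.length_pos_of_ne_nil (splitDot_ne_nil x.toList)
  omega

theorem kf_eq_one_iff (x : String) : kf x = 1 ↔ '.' ∉ x.toList := by
  rw [kf_eq]
  constructor
  · intro h hmem
    have := splitDot_length_ge_two hmem
    omega
  · intro h
    rw [splitDot_of_not_mem h]
    simp

theorem pyGet?_neg_one {α : Type} (l : List α) : PySem.List.pyGet? l (-1) = l.getLast? := by
  cases l with
  | nil => rfl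
  | cons a t =>
    simp only [PySem.List.pyGet?, PySem.List.pyIdx?]
    norm_num
    rw [List.getLast?_eq_getElem?]
    simp

theorem lastseg_eq (x : String) :
    ∃ p, (splitDot x.toList).getLast? = some p ∧ lastseg x = String.ofList p ∧
      '.' ∉ (lastseg x).toList := by
  obtain ⟨p, hp, hnp⟩ := splitDot_getLast? x.toList
  refine ⟨p, hp, ?_, ?_⟩
  · unfold lastseg
    rw [parts_eq, pyGet?_neg_one, List.getLast?_map, hp]
    rfl
  · unfold lastseg
    rw [parts_eq, pyGet?_neg_one, List.getLast?_map, hp]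
    simpa [String.toList_ofList] using hnp

theorem lastseg_not_dot (x : String) : '.' ∉ (lastseg x).toList := by
  obtain ⟨p, _, _, h⟩ := lastseg_eq x
  exact h

theorem lastseg_of_not_dot {x : String} (h : '.' ∉ x.toList) : lastseg x = x := by
  unfold lastseg
  rw [parts_eq, splitDot_of_not_mem h, pyGet?_neg_one]
  simp [String.ofList_toList]

-- the output row {'key': n, 'value': '$.' + v}
def outRow (k v : String) : List (String × String) :=
  [("key", k), ("value", String.ofList ('$' :: '.' :: v.toList))]

-- A's loop body
def stepA (sk : PySem.Dict String String) (key : String) : PySem.Dict String String :=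
  if !sk.contains (lastseg key) then sk.insert (lastseg key) key
  else sk.insert key key

-- B's winner-election loop body
def stepW (w : PySem.Dict String String) (k : String) : PySem.Dict String String :=
  if !w.contains (lastseg k) || decide (cnt k < cnt (w.getD (lastseg k) "")) then
    w.insert (lastseg k) k
  else w

-- the (name, key) assignment A's loop performs along a key list, as a recursion
def assignNames (seen : PySem.Set String) : List String → List (String × String)
  | [] => []
  | k :: r =>
    if seen.contains (lastseg k) then (k, k) :: assignNames seen r
    else (lastseg k, k) :: assignNames (seen.add (lastseg k)) r

-- the "best so far" combiner B's winner election realises per segment class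
def minStep (acc : Option String) (k : String) : Option String :=
  match acc with
  | none => some k
  | some w => if cnt k < cnt w then some k else acc

theorem main_foldA :
    ∀ (S : List String) (dA : PySem.Dict String String) (seen : PySem.Set String),
      S.Pairwise (fun a b => kf a ≤ kf b) → S.Nodup →
      (∀ s, '.' ∉ s.toList → dA.contains s = seen.contains s) →
      (∀ k ∈ dA.keys, '.' ∉ k.toList ∨ k ∉ S) →
      (∀ s ∈ seen, ∃ p, lastseg p = s ∧ (∀ k ∈ S, kf p ≤ kf k) ∧ p ∉ S) →
      (S.foldl stepA dA).items.map (fun kv => outRow kv.1 kv.2) =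
        dA.items.map (fun kv => outRow kv.1 kv.2) ++
          (assignNames seen S).map (fun p => outRow p.1 p.2) := by
  intro S
  induction S with
  | nil =>
    intro dA seen _ _ _ _ _
    simp [assignNames]
  | cons k T ih =>
    intro dA seen hpw hnd h1 h2 h3
    rw [List.pairwise_cons] at hpw
    rw [List.nodup_cons] at hnd
    simp only [List.foldl_cons]
    have hlnd : '.' ∉ (lastseg k).toList := lastseg_not_dot k
    have hbranch : dA.contains (lastseg k) = seen.contains (lastseg k) :=
      h1 (lastseg k) hlnd
    by_cases hc : seen.contains (lastseg k) = true
    · -- collision: the last segment was taken already; A keeps the full key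
      have hAc : dA.contains (lastseg k) = true := by rw [hbranch]; exact hc
      have hstepA : stepA dA k = dA.insert k k := by
        unfold stepA; rw [hAc]; simp
      have hassign : assignNames seen (k :: T) = (k, k) :: assignNames seen T := by
        simp only [assignNames]; rw [if_pos hc]
      have hkdot : '.' ∈ k.toList := by
        by_contra hkd
        have hlk : lastseg k = k := lastseg_of_not_dot hkd
        have hkseen : k ∈ seen := by
          rw [hlk] at hc
          simpa using hc
        obtain ⟨p, hp1, hp2, hp3⟩ := h3 k hkseen
        have hkf1 : kf k = 1 := (kf_eq_one_iff k).mpr hkd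
        have hkfp : kf p ≤ 1 := by
          have := hp2 k (List.mem_cons_self)
          omega
        have hp1' : kf p = 1 := le_antisymm hkfp (one_le_kf p)
        have hpd : '.' ∉ p.toList := (kf_eq_one_iff p).mp hp1'
        have hpk : p = k := by rw [← hp1, lastseg_of_not_dot hpd]
        exact hp3 (hpk ▸ List.mem_cons_self)
      have hknk : dA.contains k = false := by
        by_contra h
        have hk : k ∈ dA.keys := (PySem.Dict.contains_iff_mem_keys dA k).mp
          (by simpa using h)
        rcases h2 k hk with hdl | hnin
        · exact hdl hkdot
        · exact hnin List.mem_cons_self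
      rw [hstepA, hassign]
      rw [ih (dA.insert k k) seen hpw.2 hnd.2 ?_ ?_ ?_]
      · rw [PySem.Dict.items_insert_of_not_contains dA k hknk, List.map_append, List.map_cons]
        simp
      · intro s hs
        rw [PySem.Dict.contains_insert]
        have hsk : (s == k) = false := by
          simp only [beq_eq_false_iff_ne, ne_eq]
          rintro rfl
          exact hs hkdot
        rw [hsk, Bool.false_or]
        exact h1 s hs
      · intro k' hk'
        rcases (PySem.Dict.mem_keys_insert dA k k' k).mp hk' with rfl | hmem
        · right; exact hnd.1
        · rcases h2 k' hmem with hdl | hnin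
          · exact Or.inl hdl
          · right; intro hmT; exact hnin (List.mem_cons_of_mem _ hmT)
      · intro s hs
        obtain ⟨p, hp1, hp2, hp3⟩ := h3 s hs
        exact ⟨p, hp1, fun k' hk' => hp2 k' (List.mem_cons_of_mem _ hk'),
          fun hmT => hp3 (List.mem_cons_of_mem _ hmT)⟩
    · -- fresh: the last segment is new; A keys it by the segment
      have hc' : seen.contains (lastseg k) = false := by
        cases h : seen.contains (lastseg k)
        · rfl
        · exact absurd h hc
      have hAc : dA.contains (lastseg k) = false := by rw [hbranch]; exact hc'
      have hstepA : stepA dA k = dA.insert (lastseg k) k := by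
        unfold stepA; rw [hAc]; simp
      have hassign : assignNames seen (k :: T) =
          (lastseg k, k) :: assignNames (seen.add (lastseg k)) T := by
        simp only [assignNames]; rw [if_neg (by rw [hc']; simp)]
      rw [hstepA, hassign]
      rw [ih (dA.insert (lastseg k) k) (seen.add (lastseg k)) hpw.2 hnd.2 ?_ ?_ ?_]
      · rw [PySem.Dict.items_insert_of_not_contains dA k hAc, List.map_append, List.map_cons]
        simp
      · intro s hs
        rw [PySem.Dict.contains_insert]
        have hx : (seen.add (lastseg k)).contains s = (seen.contains s || (s == lastseg k)) := by
          cases h : s == lastseg k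
          · simp_all [PySem.Set.add, PySem.Set.contains]
          · simp_all [PySem.Set.add, PySem.Set.contains]
        rw [hx, ← h1 s hs, Bool.or_comm]
      · intro k' hk'
        rcases (PySem.Dict.mem_keys_insert dA (lastseg k) k' k).mp hk' with rfl | hmem
        · exact Or.inl hlnd
        · rcases h2 k' hmem with hdl | hnin
          · exact Or.inl hdl
          · right; intro hmT; exact hnin (List.mem_cons_of_mem _ hmT)
      · intro s hs
        rcases (PySem.Set.mem_add seen (lastseg k) s).mp hs with hsold | hsnew
        · obtain ⟨p, hp1, hp2, hp3⟩ := h3 s hsold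
          exact ⟨p, hp1, fun k' hk' => hp2 k' (List.mem_cons_of_mem _ hk'),
            fun hmT => hp3 (List.mem_cons_of_mem _ hmT)⟩
        · subst hsnew
          exact ⟨k, rfl, fun k' hk' => hpw.1 k' hk', hnd.1⟩

-- B's winner lookup, per segment class
theorem get?_stepW (w : PySem.Dict String String) (k s : String) :
    (stepW w k).get? s =
      if lastseg k = s then minStep (w.get? s) k else w.get? s := by
  unfold stepW
  cases hw : w.get? (lastseg k) with
  | none =>
    have hcon : w.contains (lastseg k) = false := by
      rw [PySem.Dict.contains_eq_isSome_get?, hw]; rfl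
    rw [hcon]
    rw [if_pos (by simp), PySem.Dict.get?_insert]
    by_cases hs : lastseg k = s
    · subst hs; simp [minStep, hw]
    · have hs' : ¬ s = lastseg k := fun h => hs h.symm
      simp [hs, hs']
  | some w' =>
    have hcon : w.contains (lastseg k) = true := by
      rw [PySem.Dict.contains_eq_isSome_get?, hw]; rfl
    have hgd : w.getD (lastseg k) "" = w' := by simp [PySem.Dict.getD, hw]
    rw [hcon, hgd]
    simp only [Bool.not_true, Bool.false_or]
    by_cases hlt : cnt k < cnt w'
    · rw [if_pos (by simp [hlt])]
      rw [PySem.Dict.get?_insert]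
      by_cases hs : lastseg k = s
      · subst hs; simp [minStep, hw, hlt]
      · have hs' : ¬ s = lastseg k := fun h => hs h.symm
        simp [hs, hs']
    · rw [if_neg (by simp [hlt])]
      by_cases hs : lastseg k = s
      · subst hs; simp [minStep, hw, hlt]
      · simp [hs]

theorem get?_foldl_stepW (K : List String) (w : PySem.Dict String String) (s : String) :
    (K.foldl stepW w).get? s =
      K.foldl (fun acc k => if lastseg k = s then minStep acc k else acc) (w.get? s) := by
  induction K generalizing w with
  | nil => rfl
  | cons k T ih =>
    simp only [List.foldl_cons]
    rw [ih, get?_stepW]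

-- head of the stable sort is the fold of minStep
theorem head?_insertBy (x : String) (ys : List String) :
    (PySem.List.insertBy (fun a b => decide (kf a < kf b)) x ys).head? =
      some (match ys.head? with
            | none => x
            | some y => if kf x < kf y then x else y) := by
  cases ys with
  | nil => rfl
  | cons y t =>
    by_cases h : kf x < kf y
    · simp [PySem.List.insertBy, h]
    · simp [PySem.List.insertBy, h]

theorem head?_sorted_min (M : List String) :
    (PySem.List.sorted M kf false).head? = M.foldl minStep none := by
  induction M using List.reverseRecOn with
  | nil => rfl
  | append_singleton t x ih =>
    rw [PySem.List.sorted_eq_foldl_insertBy] at ih ⊢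
    rw [List.foldl_append, List.foldl_append]
    simp only [List.foldl_cons, List.foldl_nil]
    rw [head?_insertBy, ← ih]
    cases hh : (List.foldl (fun acc x => PySem.List.insertBy (fun a b => decide (kf a < kf b)) x acc) [] t).head? with
    | none => rfl
    | some y =>
      simp only [minStep]
      have : kf x < kf y ↔ cnt x < cnt y := by rw [kf_eq_cnt, kf_eq_cnt]; omega
      by_cases h : cnt x < cnt y
      · simp [h, this.mpr h]
      · rw [if_neg (fun hk => h (this.mp hk))]
        simp [h]

-- a stable sort commutes with filter
theorem insertBy_filterP {α κ : Type} [LinearOrder κ] (key : α → κ) (ys : List α) (x : α)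
    (p : α → Bool) (h : ys.Pairwise (fun a b => key a ≤ key b)) :
    (PySem.List.insertBy (fun a b => decide (key a < key b)) x ys).filter p =
      if p x then PySem.List.insertBy (fun a b => decide (key a < key b)) x (ys.filter p)
      else ys.filter p := by
  induction ys with
  | nil =>
    cases hp : p x <;> simp [PySem.List.insertBy, hp]
  | cons y t ih =>
    rw [List.pairwise_cons] at h
    by_cases hlt : key x < key y
    · rw [show PySem.List.insertBy (fun a b => decide (key a < key b)) x (y :: t) = x :: y :: t
        from by simp [PySem.List.insertBy, hlt]]
      by_cases hp : p x = true
      · rw [if_pos hp, List.filter_cons_of_pos hp]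
        -- every kept element of y :: t has key ≥ key y > key x
        cases hf : (y :: t).filter p with
        | nil => simp [PySem.List.insertBy]
        | cons z zs =>
          have hz : z ∈ (y :: t).filter p := by rw [hf]; exact List.mem_cons_self
          have hz' := List.mem_filter.mp hz
          have hky : key y ≤ key z := by
            rcases List.mem_cons.mp hz'.1 with rfl | hzt
            · exact le_refl _
            · exact h.1 z hzt
          rw [show PySem.List.insertBy (fun a b => decide (key a < key b)) x (z :: zs) = x :: z :: zs
            from by simp [PySem.List.insertBy, lt_of_lt_of_le hlt hky]]
      · rw [if_neg hp, List.filter_cons_of_neg (by simpa using hp)]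
    · rw [show PySem.List.insertBy (fun a b => decide (key a < key b)) x (y :: t) =
            y :: PySem.List.insertBy (fun a b => decide (key a < key b)) x t
        from by simp [PySem.List.insertBy, hlt]]
      rw [List.filter_cons, List.filter_cons, ih h.2]
      by_cases hpy : p y = true
      · rw [if_pos hpy, if_pos hpy]
        by_cases hpx : p x = true
        · rw [if_pos hpx, if_pos hpx]
          rw [show PySem.List.insertBy (fun a b => decide (key a < key b)) x (y :: t.filter p) =
                y :: PySem.List.insertBy (fun a b => decide (key a < key b)) x (t.filter p)
            from by simp [PySem.List.insertBy, hlt]]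
        · rw [if_neg hpx, if_neg hpx]
      · rw [if_neg hpy, if_neg hpy]

theorem filter_sorted (M : List String) (p : String → Bool) :
    (PySem.List.sorted M kf false).filter p = PySem.List.sorted (M.filter p) kf false := by
  induction M using List.reverseRecOn with
  | nil => rfl
  | append_singleton t x ih =>
    rw [List.filter_append]
    rw [PySem.List.sorted_eq_foldl_insertBy, List.foldl_append]
    simp only [List.foldl_cons, List.foldl_nil]
    rw [← PySem.List.sorted_eq_foldl_insertBy]
    rw [insertBy_filterP kf _ x p (PySem.List.sorted_pairwise t kf), ih]
    by_cases hp : p x = true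
    · rw [if_pos hp, List.filter_cons_of_pos hp, List.filter_nil]
      rw [PySem.List.sorted_eq_foldl_insertBy (t.filter p ++ [x]), List.foldl_append]
      simp only [List.foldl_cons, List.foldl_nil]
      rw [← PySem.List.sorted_eq_foldl_insertBy]
    · rw [if_neg hp, List.filter_cons_of_neg (by simpa using hp), List.filter_nil, List.append_nil]

-- a stable sort of mapped rows is the map of the sort by the projected key
theorem insertBy_map {α β : Type} (g : α → β) (cmp1 : β → β → Bool) (cmp2 : α → α → Bool)
    (hc : ∀ a b, cmp1 (g a) (g b) = cmp2 a b) (x : α) (ys : List α) :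
    PySem.List.insertBy cmp1 (g x) (ys.map g) = (PySem.List.insertBy cmp2 x ys).map g := by
  induction ys with
  | nil => rfl
  | cons y t ih =>
    simp only [List.map_cons]
    cases h : cmp2 x y
    · rw [show PySem.List.insertBy cmp2 x (y :: t) = y :: PySem.List.insertBy cmp2 x t
        from by simp [PySem.List.insertBy, h]]
      rw [show PySem.List.insertBy cmp1 (g x) (g y :: t.map g)
            = g y :: PySem.List.insertBy cmp1 (g x) (t.map g)
        from by simp [PySem.List.insertBy, hc, h]]
      rw [ih]; rfl
    · rw [show PySem.List.insertBy cmp2 x (y :: t) = x :: y :: t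
        from by simp [PySem.List.insertBy, h]]
      rw [show PySem.List.insertBy cmp1 (g x) (g y :: t.map g) = g x :: g y :: t.map g
        from by simp [PySem.List.insertBy, hc, h]]
      rfl

theorem sorted_map_key {α β κ : Type} [LT κ] [DecidableLT κ] (g : α → β) (key : β → κ)
    (K : List α) :
    PySem.List.sorted (K.map g) key false =
      (PySem.List.sorted K (fun k => key (g k)) false).map g := by
  rw [PySem.List.sorted_eq_foldl_insertBy, PySem.List.sorted_eq_foldl_insertBy, List.foldl_map]
  suffices hgen : ∀ (K : List α) (ys : List α),
      K.foldl (fun acc x => PySem.List.insertBy (fun a b => decide (key a < key b)) (g x) acc) (ys.map g) =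
      (K.foldl (fun acc x => PySem.List.insertBy (fun a b => decide (key (g a) < key (g b))) x acc) ys).map g by
    simpa using hgen K []
  intro K
  induction K with
  | nil => simp
  | cons k T ih =>
    intro ys
    simp only [List.foldl_cons]
    rw [insertBy_map g _ _ (fun a b => rfl), ih]

theorem sorted_cnt_eq_sorted_kf (K : List String) :
    PySem.List.sorted K cnt false = PySem.List.sorted K kf false := by
  rw [PySem.List.sorted_eq_foldl_insertBy, PySem.List.sorted_eq_foldl_insertBy]
  have : (fun (a b : String) => decide (cnt a < cnt b)) = (fun a b => decide (kf a < kf b)) := by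
    funext a b
    have : cnt a < cnt b ↔ kf a < kf b := by rw [kf_eq_cnt, kf_eq_cnt]; omega
    rw [decide_eq_decide]
    exact this
  rw [this]

-- B's per-row naming agrees with A's sequential assignment
theorem assignNames_eq (W : PySem.Dict String String) :
    ∀ (M : List String) (seen : PySem.Set String), M.Nodup →
      (∀ k ∈ M,
        (seen.contains (lastseg k) = true → ∃ w, W.get? (lastseg k) = some w ∧ w ∉ M) ∧
        (seen.contains (lastseg k) = false →
          (M.filter (fun j => decide (lastseg j = lastseg k))).head? = W.get? (lastseg k))) →
      assignNames seen M =
        M.map (fun k => (if W.getD (lastseg k) "" == k then lastseg k else k, k)) := by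
  intro M
  induction M with
  | nil => intro seen _ _; rfl
  | cons k r ih =>
    intro seen hnd hyp
    rw [List.nodup_cons] at hnd
    have hk := hyp k List.mem_cons_self
    by_cases hc : seen.contains (lastseg k) = true
    · -- taken: A keeps the full key, and the winner is not k
      obtain ⟨w, hw, hwm⟩ := hk.1 hc
      have hwk : w ≠ k := fun e => hwm (e ▸ List.mem_cons_self)
      have hname : (W.getD (lastseg k) "" == k) = false := by
        rw [PySem.Dict.getD, hw]
        simpa using hwk
      rw [show assignNames seen (k :: r) = (k, k) :: assignNames seen r from by
        simp only [assignNames]; rw [if_pos hc]]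
      rw [List.map_cons, hname]
      simp only [Bool.false_eq_true, if_false]
      congr 1
      apply ih seen hnd.2
      intro j hj
      have hjh := hyp j (List.mem_cons_of_mem _ hj)
      constructor
      · intro hcj
        obtain ⟨w', hw', hwm'⟩ := hjh.1 hcj
        exact ⟨w', hw', fun hm => hwm' (List.mem_cons_of_mem _ hm)⟩
      · intro hcj
        have hne : ¬ (lastseg k = lastseg j) := by
          intro e
          rw [← e] at hcj
          rw [hc] at hcj
          exact absurd hcj (by simp)
        have := hjh.2 hcj
        rwa [List.filter_cons_of_neg (by simpa using hne)] at this
    · -- fresh: the winner of this class is k itself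
      have hc' : seen.contains (lastseg k) = false := by
        cases h : seen.contains (lastseg k)
        · rfl
        · exact absurd h hc
      have hflt := hk.2 hc'
      rw [List.filter_cons_of_pos (by simp)] at hflt
      simp only [List.head?_cons] at hflt
      have hWk : W.get? (lastseg k) = some k := hflt.symm
      have hname : (W.getD (lastseg k) "" == k) = true := by
        rw [PySem.Dict.getD, hWk]; simp
      rw [show assignNames seen (k :: r) = (lastseg k, k) :: assignNames (seen.add (lastseg k)) r
        from by simp only [assignNames]; rw [if_neg (by rw [hc']; simp)]]
      rw [List.map_cons, hname]
      simp only [if_true]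
      congr 1
      apply ih (seen.add (lastseg k)) hnd.2
      intro j hj
      have hjh := hyp j (List.mem_cons_of_mem _ hj)
      by_cases hsame : lastseg j = lastseg k
      · constructor
        · intro _
          exact ⟨k, by rw [hsame, hWk], hnd.1⟩
        · intro hcj
          exfalso
          have : lastseg j ∈ seen.add (lastseg k) := by
            rw [hsame]
            exact (PySem.Set.mem_add seen (lastseg k) (lastseg k)).mpr (Or.inr rfl)
          have : (seen.add (lastseg k)).contains (lastseg j) = true := by
            simpa [PySem.Set.contains] using this
          rw [this] at hcj
          exact absurd hcj (by simp)
      · have hmemadd : (seen.add (lastseg k)).contains (lastseg j) = seen.contains (lastseg j) := by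
          cases h : seen.contains (lastseg j) with
          | true =>
            have : lastseg j ∈ seen := by simpa [PySem.Set.contains] using h
            have : lastseg j ∈ seen.add (lastseg k) :=
              (PySem.Set.mem_add seen (lastseg k) (lastseg j)).mpr (Or.inl this)
            simpa [PySem.Set.contains] using this
          | false =>
            have h1 : lastseg j ∉ seen := by
              intro hm
              have : seen.contains (lastseg j) = true := by simpa [PySem.Set.contains] using hm
              rw [h] at this; exact absurd this (by simp)
            have : lastseg j ∉ seen.add (lastseg k) := by
              intro hm
              rcases (PySem.Set.mem_add seen (lastseg k) (lastseg j)).mp hm with hm1 | hm2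
              · exact h1 hm1
              · exact hsame hm2
            simpa [PySem.Set.contains] using this
        rw [hmemadd]
        constructor
        · intro hcj
          obtain ⟨w', hw', hwm'⟩ := hjh.1 hcj
          exact ⟨w', hw', fun hm => hwm' (List.mem_cons_of_mem _ hm)⟩
        · intro hcj
          have := hjh.2 hcj
          rwa [List.filter_cons_of_neg (by simpa using fun e => hsame e.symm)] at this

-- ===== VERDICT (by name: the statement is the Claim_ definition above) =====
theorem simplify_keys_spec : Claim_equal_simplify_keys := by
  unfold Claim_equal_simplify_keys Spec_simplify_keys
  intro dic _
  set K := (PySem.Dict.ofList dic).keys with hK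
  have hKnd : K.Nodup := PySem.Dict.nodup_keys_ofList dic
  set L := PySem.List.sorted K kf false with hL
  have hLnd : L.Nodup := ((PySem.List.sorted_perm K kf false).symm).nodup hKnd
  set W := K.foldl stepW PySem.Dict.empty with hW
  -- A's side: the loop over the sorted keys, then the items projection
  have hA : simplify_keys dic =
      (L.foldl stepA PySem.Dict.empty).items.map (fun kv => outRow kv.1 kv.2) := rfl
  -- B's side: the winner table is W, the rows are a map over K, then the stable sort
  set g : String → Nat × List (String × String) :=
    fun k => (cnt k, outRow (if W.getD (lastseg k) "" == k then lastseg k else k) k) with hg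
  have hB : simplify_keys_alt dic =
      (PySem.List.sorted (K.map g) (fun t => t.1) false).map (fun t => t.2) := rfl
  -- W's lookup is the head of the segment class in sorted order
  have hWs : ∀ s, W.get? s = (L.filter (fun j => decide (lastseg j = s))).head? := by
    intro s
    rw [hW, get?_foldl_stepW, PySem.Dict.get?_empty]
    rw [show (fun (acc : Option String) k => if lastseg k = s then minStep acc k else acc)
          = (fun acc k => if (fun k => lastseg k = s) k then minStep acc k else acc) from rfl]
    rw [PySem.List.foldl_ite_eq_foldl_filter (fun k => lastseg k = s) minStep K none]
    rw [← head?_sorted_min (K.filter (fun k => decide (lastseg k = s)))]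
    rw [hL, filter_sorted K (fun j => decide (lastseg j = s))]
  -- A's sequential names agree with B's winner-based names
  have hAN : assignNames PySem.Set.empty L =
      L.map (fun k => (if W.getD (lastseg k) "" == k then lastseg k else k, k)) := by
    apply assignNames_eq W L PySem.Set.empty hLnd
    intro k _
    constructor
    · intro h
      exact absurd h (by simp [PySem.Set.empty, PySem.Set.contains])
    · intro _
      exact (hWs (lastseg k)).symm
  rw [hA, hB]
  rw [main_foldA L PySem.Dict.empty PySem.Set.empty
    (PySem.List.sorted_pairwise K kf) hLnd
    (fun s _ => rfl)
    (fun k hk => by simp [PySem.Dict.keys_empty] at hk)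
    (fun s hs => by simp [PySem.Set.empty] at hs)]
  rw [show (PySem.Dict.empty : PySem.Dict String String).items = [] from rfl]
  simp only [List.map_nil, List.nil_append]
  rw [hAN]
  rw [sorted_map_key g (fun t => t.1) K]
  rw [show (fun k => (g k).1) = cnt from rfl]
  rw [sorted_cnt_eq_sorted_kf K, ← hL]
  simp only [List.map_map]
  rfl
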